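-- pv_equiv track=rewrite | github.com/asekulski21/brute-force-demo | CSI3480-SummerProject-main/app.py | generate_incremental_passwords
-- ===== SOURCE A (Python) =====
-- import string
--
-- def generate_incremental_passwords(max_length: int = 4) -> list[str]:
--     """Generate passwords using incremental attack method"""
--     passwords = []
--     chars = string.ascii_lowercase + string.digits  # 36 characters
--
--     # Generate all combinations up to max_length
--     from itertools import product
--     for length in range(1, max_length + 1):
--         # Generate combinations of current length
--         for combo in product(chars, repeat=length):
--             passwords.append(''.join(combo))
--
--     return passwords
-- ===== SOURCE B (Python) =====
-- import string
--
-- def generate_incremental_passwords(max_length: int = 4) -> list[str]: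
--     """Generate passwords using incremental attack method"""
--     chars = string.ascii_lowercase + string.digits  # 36 characters
--
--     def gen(n: int) -> list[str]:
--         # all strings of exactly length n over chars, first char slowest
--         if n == 0:
--             return ['']
--         return [c + rest for c in chars for rest in gen(n - 1)]
--
--     return [p for n in range(1, max_length + 1) for p in gen(n)]
-- ===== Notes on version B (the rewrite author's own statement) =====
-- stated objective: alternative
-- what changed: Replaces the itertools.product loop (which extends tuples on the right, pool by pool) with a recursive length decomposition gen(n) = [c + rest for c in chars for rest in gen(n-1)] that builds each exact-length block by prefixing a character, concatenated over lengths 1..max_length by a comprehension.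
import Mathlib
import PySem

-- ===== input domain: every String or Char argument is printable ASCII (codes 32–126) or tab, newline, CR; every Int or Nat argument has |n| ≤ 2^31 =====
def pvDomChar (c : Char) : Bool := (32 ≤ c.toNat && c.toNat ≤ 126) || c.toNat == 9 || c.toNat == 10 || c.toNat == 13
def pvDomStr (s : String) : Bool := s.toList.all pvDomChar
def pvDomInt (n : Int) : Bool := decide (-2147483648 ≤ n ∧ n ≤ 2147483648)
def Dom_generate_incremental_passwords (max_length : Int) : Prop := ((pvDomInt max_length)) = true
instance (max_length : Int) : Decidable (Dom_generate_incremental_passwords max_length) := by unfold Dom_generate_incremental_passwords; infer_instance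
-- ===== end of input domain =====

-- B replaces A's itertools.product loop (extend on the right, pool by pool) by a recursion
-- on the length that prefixes a character to every shorter suffix; same output, same cost.


-- ===== PORT A =====
-- chars = string.ascii_lowercase + string.digits
def pvChars : List Char := "abcdefghijklmnopqrstuvwxyz0123456789".toList

-- itertools.product(chars, repeat=n), ported as its documented equivalent:
-- result = [[]]; for pool in pools: result = [x+[y] for x in result for y in pool]
def pvProdRep (n : Nat) : List (List Char) :=
  (List.range n).foldl (fun result _ => result.flatMap (fun x => pvChars.map (fun y => x ++ [y]))) [[]]

def generate_incremental_passwords (max_length : Int) : List String :=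
  (PySem.List.pyRange 1 (max_length + 1) 1).foldl
    (fun passwords length =>
      (pvProdRep length.toNat).foldl (fun ps combo => ps ++ [String.ofList combo]) passwords)
    []

-- ===== PORT B =====
-- gen(n): all exact-length-n char lists, by prefixing a char to each list of gen(n-1)
def pvGen : Nat → List (List Char)
  | 0 => [[]]
  | n + 1 => pvChars.flatMap (fun c => (pvGen n).map (fun rest => c :: rest))

def generate_incremental_passwords_alt (max_length : Int) : List String :=
  (PySem.List.pyRange 1 (max_length + 1) 1).flatMap (fun n => (pvGen n.toNat).map String.ofList)

-- ===== PRECONDITION & SPEC =====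
def Spec_generate_incremental_passwords (max_length : Int) (out : List String) : Prop := out = generate_incremental_passwords_alt max_length
instance (max_length : Int) (out : List String) : Decidable (Spec_generate_incremental_passwords max_length out) := by unfold Spec_generate_incremental_passwords; infer_instance

-- ===== CLAIM (what is proved, stated in full; the proofs are below) =====
def Claim_equal_generate_incremental_passwords : Prop := ∀ (max_length : Int), Dom_generate_incremental_passwords max_length → Spec_generate_incremental_passwords max_length (generate_incremental_passwords max_length)

-- ===== LEMMAS AND PROOFS =====

-- one product step (append a char on the right) commutes with prefixing a fixed char
theorem pvStep_map_cons (c : Char) (L : List (List Char)) :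
    (L.map (fun rest => c :: rest)).flatMap (fun x => pvChars.map (fun y => x ++ [y]))
      = (L.flatMap (fun x => pvChars.map (fun y => x ++ [y]))).map (fun rest => c :: rest) := by
  simp [List.flatMap_map, List.map_flatMap, List.map_map, Function.comp_def]

-- applying one right-append product step to gen n yields gen (n+1)
theorem pvStep_gen (n : Nat) :
    (pvGen n).flatMap (fun x => pvChars.map (fun y => x ++ [y])) = pvGen (n + 1) := by
  induction n with
  | zero => decide
  | succ m ih =>
      show (pvGen (m + 1)).flatMap _ = pvGen (m + 2)
      rw [pvGen, List.flatMap_assoc]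
      conv_rhs => rw [pvGen, ← ih]
      refine List.flatMap_congr (fun c _ => ?_)
      exact pvStep_map_cons c (pvGen m)

theorem pvProdRep_eq_gen (n : Nat) : pvProdRep n = pvGen n := by
  induction n with
  | zero => rfl
  | succ m ih =>
      unfold pvProdRep
      rw [List.range_succ, List.foldl_append]
      show (pvProdRep m).flatMap _ = pvGen (m + 1)
      rw [ih, pvStep_gen]

-- ===== VERDICT (by name: the statement is the Claim_ definition above) =====
theorem generate_incremental_passwords_spec : Claim_equal_generate_incremental_passwords := by
  intro max_length _
  show generate_incremental_passwords max_length = generate_incremental_passwords_alt max_length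
  unfold generate_incremental_passwords generate_incremental_passwords_alt
  simp only [PySem.List.foldl_append_singleton_eq_map, pvProdRep_eq_gen]
  exact PySem.List.foldl_append_eq_flatMap _ _ _
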